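-- pv_equiv track=rewrite | github.com/gauravjha850/LeetCode-Solutions | 4295-count-indices-with-opposite-parity/count-indices-with-opposite-parity.py | countOppositeParity
-- ===== SOURCE A (Python) =====
-- def countOppositeParity(nums):
--     total_even=0
--     total_odd=0
--     for num in nums :
--         if num%2==0:
--             total_even+=1
--         else:
--             total_odd+=1
--     seen_odd=0
--     seen_even=0
--     for i in range (len(nums)):
--         current_val=nums[i]
--         if current_val%2==0:
--             nums[i]=total_odd-seen_odd
--             seen_even+=1
--         else:
--             nums[i]=total_even - seen_even
--             seen_odd+=1
--     return nums
-- ===== SOURCE B (Python) =====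
-- # Single backward pass: result[i] = count of opposite-parity elements after i.
-- # Mutates and returns the same list object, like A.
-- def countOppositeParity(nums):
--     cnt_even = 0
--     cnt_odd = 0
--     for i in range(len(nums) - 1, -1, -1):
--         v = nums[i]
--         if v % 2 == 0:
--             nums[i] = cnt_odd
--             cnt_even += 1
--         else:
--             nums[i] = cnt_even
--             cnt_odd += 1
--     return nums
-- ===== Notes on version B (the rewrite author's own statement) =====
-- stated objective: alternative
-- what changed: Replaces A's two forward passes (global totals then subtracting prefix counts) with one backward pass maintaining suffix parity counters.
import Mathlib
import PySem

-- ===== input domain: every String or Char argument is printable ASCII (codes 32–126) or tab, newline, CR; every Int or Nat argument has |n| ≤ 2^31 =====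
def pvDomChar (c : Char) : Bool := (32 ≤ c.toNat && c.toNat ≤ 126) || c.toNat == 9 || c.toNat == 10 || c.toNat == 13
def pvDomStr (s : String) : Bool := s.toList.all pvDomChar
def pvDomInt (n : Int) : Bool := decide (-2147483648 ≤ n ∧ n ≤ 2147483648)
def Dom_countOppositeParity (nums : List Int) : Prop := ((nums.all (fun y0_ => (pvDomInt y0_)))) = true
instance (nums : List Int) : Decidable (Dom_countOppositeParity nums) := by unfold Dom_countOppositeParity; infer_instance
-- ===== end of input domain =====

-- B replaces A's two forward passes (totals, then prefix-count subtraction) with one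
-- backward pass keeping suffix parity counters; return-value equivalence (both Pythons
-- mutate the argument list in place identically and return it).


-- ===== PORT A =====
-- second pass of A: walk the indices in order carrying (seen_odd, seen_even);
-- each step reads nums[i] before overwriting it, so consuming the list element by
-- element is the structural recursion of that loop over the same state.
def aPassTwo (total_even total_odd : Int) : List Int → Int → Int → List Int
  | [], _, _ => []
  | v :: rest, seen_odd, seen_even =>
    if PySem.Int.mod v 2 == 0 then
      (total_odd - seen_odd) :: aPassTwo total_even total_odd rest seen_odd (seen_even + 1)
    else
      (total_even - seen_even) :: aPassTwo total_even total_odd rest (seen_odd + 1) seen_even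

def countOppositeParity (nums : List Int) : List Int :=
  let totals := nums.foldl
    (fun (p : Int × Int) num =>
      if PySem.Int.mod num 2 == 0 then (p.1 + 1, p.2) else (p.1, p.2 + 1))
    (0, 0)
  aPassTwo totals.1 totals.2 nums 0 0

-- ===== PORT B =====
-- backward pass: recurse on the tail first (elements after i), returning
-- (rewritten suffix, cnt_even, cnt_odd) for that suffix.
def altGo : List Int → List Int × Int × Int
  | [] => ([], 0, 0)
  | v :: rest =>
    let r := altGo rest
    if PySem.Int.mod v 2 == 0 then (r.2.2 :: r.1, r.2.1 + 1, r.2.2)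
    else (r.2.1 :: r.1, r.2.1, r.2.2 + 1)

def countOppositeParity_alt (nums : List Int) : List Int := (altGo nums).1

-- ===== PRECONDITION & SPEC =====
def Spec_countOppositeParity (nums : List Int) (out : List Int) : Prop := out = countOppositeParity_alt nums
instance (nums : List Int) (out : List Int) : Decidable (Spec_countOppositeParity nums out) := by unfold Spec_countOppositeParity; infer_instance

-- ===== CLAIM (what is proved, stated in full; the proofs are below) =====
def Claim_equal_countOppositeParity : Prop := ∀ (nums : List Int), Dom_countOppositeParity nums → Spec_countOppositeParity nums (countOppositeParity nums)

-- ===== LEMMAS AND PROOFS =====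

-- A's first pass, started from (a, b), adds B's suffix counters of the whole list.
theorem foldl_totals (l : List Int) (a b : Int) :
    l.foldl
      (fun (p : Int × Int) num =>
        if PySem.Int.mod num 2 == 0 then (p.1 + 1, p.2) else (p.1, p.2 + 1))
      (a, b) = (a + (altGo l).2.1, b + (altGo l).2.2) := by
  induction l generalizing a b with
  | nil => simp [altGo]
  | cons v rest ih =>
    simp only [List.foldl_cons, altGo]
    by_cases h : (PySem.Int.mod v 2 == 0) = true
    · rw [if_pos h, if_pos h, ih]
      simp only [Prod.mk.injEq]
      exact ⟨by ring, trivial⟩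
    · rw [if_neg h, if_neg h, ih]
      simp only [Prod.mk.injEq]
      exact ⟨trivial, by ring⟩

-- invariant of A's second pass: if the totals equal seen-so-far plus the suffix
-- counters, it produces exactly B's rewritten suffix.
theorem aPassTwo_eq (l : List Int) (so se : Int) :
    aPassTwo (se + (altGo l).2.1) (so + (altGo l).2.2) l so se = (altGo l).1 := by
  induction l generalizing so se with
  | nil => simp [aPassTwo, altGo]
  | cons v rest ih =>
    simp only [altGo, aPassTwo]
    by_cases h : (PySem.Int.mod v 2 == 0) = true
    · rw [if_pos h, if_pos h]
      congr 1
      · ring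
      · rw [show se + ((altGo rest).2.1 + 1) = se + 1 + (altGo rest).2.1 by ring]
        exact ih so (se + 1)
    · rw [if_neg h, if_neg h]
      congr 1
      · ring
      · rw [show so + ((altGo rest).2.2 + 1) = so + 1 + (altGo rest).2.2 by ring]
        exact ih (so + 1) se

-- ===== VERDICT (by name: the statement is the Claim_ definition above) =====
theorem countOppositeParity_spec : Claim_equal_countOppositeParity := by
  intro nums _
  show countOppositeParity nums = countOppositeParity_alt nums
  unfold countOppositeParity countOppositeParity_alt
  rw [foldl_totals]
  simpa using aPassTwo_eq nums 0 0
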